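-- pv_equiv track=rewrite | github.com/jack-at-someai/na-k-atpase-3d | knowledge-graph/extract/extract_references.py | _strip_backtick_strings
-- ===== SOURCE A (Python) =====
-- def _strip_backtick_strings(text: str) -> str:
--     """Replace template literal strings (backtick-delimited) with empty strings.
--
--     Handles nested backticks carefully by tracking depth. This removes the
--     long HTML intro fields so they don't interfere with object extraction.
--     """
--     result = []
--     i = 0
--     while i < len(text):
--         if text[i] == '`':
--             # Skip everything until the matching closing backtick.
--             # Template literals can contain ${...} but no nested backticks
--             # in these files, so simple scan is safe.
--             i += 1
--             while i < len(text) and text[i] != '`':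
--                 if text[i] == '\\':
--                     i += 1  # skip escaped char
--                 i += 1
--             i += 1  # skip closing backtick
--             result.append('""')
--         else:
--             result.append(text[i])
--             i += 1
--     return ''.join(result)
-- ===== SOURCE B (Python) =====
-- def _strip_backtick_strings(text: str) -> str:
--     """Replace backtick-delimited template literals with '""' in one flat pass."""
--     out = []
--     in_string = False
--     escaped = False
--     for ch in text:
--         if not in_string:
--             if ch == '`':
--                 in_string = True
--                 escaped = False
--             else:
--                 out.append(ch)
--         elif escaped:
--             escaped = False
--         elif ch == '\\':
--             escaped = True
--         elif ch == '`':
--             in_string = False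
--             out.append('""')
--     if in_string:
--         out.append('""')
--     return ''.join(out)
-- ===== Notes on version B (the rewrite author's own statement) =====
-- stated objective: idiomatic
-- what changed: Replaced A's index-driven outer loop with a nested inner scanning loop by a flat single-pass character state machine keeping in_string/escaped booleans (one for-loop over the string, no per-character indexing).
import Mathlib
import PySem

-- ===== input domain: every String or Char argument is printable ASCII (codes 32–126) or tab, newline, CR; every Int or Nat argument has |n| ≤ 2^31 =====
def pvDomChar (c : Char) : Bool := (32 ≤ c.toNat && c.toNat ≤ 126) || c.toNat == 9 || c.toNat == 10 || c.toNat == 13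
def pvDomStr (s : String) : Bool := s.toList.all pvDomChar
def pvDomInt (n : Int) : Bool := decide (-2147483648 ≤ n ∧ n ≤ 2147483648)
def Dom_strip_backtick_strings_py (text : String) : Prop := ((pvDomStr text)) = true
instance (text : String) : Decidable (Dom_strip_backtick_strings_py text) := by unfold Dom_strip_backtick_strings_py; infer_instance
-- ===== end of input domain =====

-- B replaces A's index-driven outer/inner scanning loops by a single flat fold with
-- in_string/escaped booleans (objective: idiomatic single-pass state machine; same cost).

-- ===== PORT A =====
-- A's inner while loop: consume chars until the closing backtick (a backslash skips
-- the following char); returns what remains after the closing backtick.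
def aInner : List Char → List Char
  | [] => []
  | c :: rest =>
    if c = '`' then rest
    else if c = '\\' then
      match rest with
      | [] => []
      | _ :: r => aInner r
    else aInner rest

-- needed for aOuter's termination
theorem aInner_length_le (l : List Char) : (aInner l).length ≤ l.length := by
  induction l using aInner.induct <;> rw [aInner.eq_def] <;> simp_all <;> omega

-- A's outer while loop: on a backtick run the inner loop and append '""',
-- otherwise append the character.
def aOuter : List Char → List String
  | [] => []
  | c :: rest =>
    if c = '`' then "\"\"" :: aOuter (aInner rest)
    else String.singleton c :: aOuter rest
termination_by l => l.length
decreasing_by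
  · have := aInner_length_le rest; simp; omega
  · simp

def strip_backtick_strings_py (text : String) : String :=
  PySem.Str.join "" (aOuter text.toList)

-- ===== PORT B =====
-- one step of B's for-loop over the characters; state = (out, in_string, escaped)
def bStep (s : List String × Bool × Bool) (ch : Char) : List String × Bool × Bool :=
  let (out, ins, esc) := s
  if !ins then
    if ch = '`' then (out, true, false)
    else (out ++ [String.singleton ch], false, false)
  else if esc then (out, true, false)
  else if ch = '\\' then (out, true, true)
  else if ch = '`' then (out ++ ["\"\""], false, false)
  else (out, ins, esc)

-- B's final 'if in_string: out.append('""')'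
def bFin (r : List String × Bool × Bool) : List String :=
  if r.2.1 then r.1 ++ ["\"\""] else r.1

def strip_backtick_strings_py_alt (text : String) : String :=
  PySem.Str.join "" (bFin (text.toList.foldl bStep ([], false, false)))

-- ===== PRECONDITION & SPEC =====
def Spec_strip_backtick_strings_py (text : String) (out : String) : Prop := out = strip_backtick_strings_py_alt text
instance (text : String) (out : String) : Decidable (Spec_strip_backtick_strings_py text out) := by unfold Spec_strip_backtick_strings_py; infer_instance

-- ===== CLAIM (what is proved, stated in full; the proofs are below) =====
def Claim_equal_strip_backtick_strings_py : Prop := ∀ (text : String), Dom_strip_backtick_strings_py text → Spec_strip_backtick_strings_py text (strip_backtick_strings_py text)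

-- ===== LEMMAS AND PROOFS =====

-- evaluation lemmas for the branches of A's inner loop
theorem aInner_bt (rest : List Char) : aInner ('`' :: rest) = rest := by
  rw [aInner.eq_def]; simp

theorem aInner_bs_nil : aInner ['\\'] = [] := by
  rw [aInner.eq_def]; simp

theorem aInner_bs (d : Char) (r : List Char) : aInner ('\\' :: d :: r) = aInner r := by
  rw [aInner.eq_def]; simp

theorem aInner_other (c : Char) (rest : List Char) (h1 : ¬ c = '`') (h2 : ¬ c = '\\') :
    aInner (c :: rest) = aInner rest := by
  rw [aInner.eq_def]; simp [h1, h2]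

-- evaluation lemmas for one step of B's state machine
theorem bStep_out (acc : List String) (c : Char) (h : ¬ c = '`') :
    bStep (acc, false, false) c = (acc ++ [String.singleton c], false, false) := by
  simp [bStep, h]

theorem bStep_out_bt (acc : List String) : bStep (acc, false, false) '`' = (acc, true, false) := by
  simp [bStep]

theorem bStep_esc (acc : List String) (c : Char) : bStep (acc, true, true) c = (acc, true, false) := by
  simp [bStep]

theorem bStep_in_bs (acc : List String) : bStep (acc, true, false) '\\' = (acc, true, true) := by
  simp [bStep]

theorem bStep_in_bt (acc : List String) : bStep (acc, true, false) '`' = (acc ++ ["\"\""], false, false) := by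
  simp [bStep]

theorem bStep_in (acc : List String) (c : Char) (h1 : ¬ c = '\\') (h2 : ¬ c = '`') :
    bStep (acc, true, false) c = (acc, true, false) := by
  simp [bStep, h1, h2]

-- B's fold, started outside (resp. inside, not escaped) a string, produces exactly
-- what A's outer loop (resp. '""' then the outer loop after the inner scan) produces.
theorem bFold_eq_aOuter : ∀ (n : Nat) (cs : List Char), cs.length ≤ n →
    (∀ acc, bFin (cs.foldl bStep (acc, false, false)) = acc ++ aOuter cs) ∧
    (∀ acc, bFin (cs.foldl bStep (acc, true, false)) = acc ++ ["\"\""] ++ aOuter (aInner cs)) := by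
  intro n
  induction n with
  | zero =>
    intro cs h
    have : cs = [] := List.eq_nil_of_length_eq_zero (Nat.le_zero.mp h)
    subst this
    constructor <;> intro acc <;> simp [List.foldl, bFin, aOuter, aInner]
  | succ n ih =>
    intro cs h
    cases cs with
    | nil =>
      constructor <;> intro acc <;> simp [List.foldl, bFin, aOuter, aInner]
    | cons c rest =>
      simp only [List.length_cons] at h
      constructor
      · intro acc
        by_cases hc : c = '`'
        · subst hc
          rw [List.foldl_cons, bStep_out_bt, (ih rest (by omega)).2 acc]
          simp [aOuter]
        · rw [List.foldl_cons, bStep_out acc c hc,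
              (ih rest (by omega)).1 (acc ++ [String.singleton c])]
          simp [aOuter, if_neg hc]
      · intro acc
        by_cases hb : c = '\\'
        · subst hb
          rw [List.foldl_cons, bStep_in_bs]
          cases rest with
          | nil =>
            simp [List.foldl, bFin, aInner_bs_nil, aOuter]
          | cons d r =>
            rw [List.foldl_cons, bStep_esc, (ih r (by simp at h; omega)).2 acc]
            simp [aInner_bs]
        · by_cases hc : c = '`'
          · subst hc
            rw [List.foldl_cons, bStep_in_bt, (ih rest (by omega)).1 (acc ++ ["\"\""])]
            simp [aInner_bt]
          · rw [List.foldl_cons, bStep_in acc c hb hc, (ih rest (by omega)).2 acc]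
            simp [aInner_other c rest hc hb]

-- ===== VERDICT (by name: the statement is the Claim_ definition above) =====
theorem strip_backtick_strings_py_spec : Claim_equal_strip_backtick_strings_py := by
  intro text _
  unfold Spec_strip_backtick_strings_py strip_backtick_strings_py strip_backtick_strings_py_alt
  rw [(bFold_eq_aOuter text.toList.length text.toList le_rfl).1 []]
  simp
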